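-- pv_equiv track=rewrite | github.com/JBGUIMBAUD/ML_based_ECRS_in_European_children | utils.py | get_one_hot_columns_list
-- ===== SOURCE A (Python) =====
-- def get_one_hot_columns_list(features_list:list, one_hot_columns : list):
--     features_list_ohupdated = []
--     for col in features_list:
--         added_cat = False
--         for oh in one_hot_columns:
--             if oh.startswith(col):
--                 features_list_ohupdated.append(oh)
--                 added_cat = True
--         if added_cat==False:
--             features_list_ohupdated.append(col)
--     return features_list_ohupdated
-- ===== SOURCE B (Python) =====
-- def get_one_hot_columns_list(features_list: list, one_hot_columns: list):
--     # One pass over one_hot_columns, distributing each into per-feature buckets,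
--     # then assemble the output feature by feature.
--     buckets = [[] for _ in features_list]
--     for oh in one_hot_columns:
--         for bucket, col in zip(buckets, features_list):
--             if oh.startswith(col):
--                 bucket.append(oh)
--     out = []
--     for col, bucket in zip(features_list, buckets):
--         out.extend(bucket if bucket else [col])
--     return out
-- ===== Notes on version B (the rewrite author's own statement) =====
-- stated objective: alternative
-- what changed: B interchanges the nested loops: it makes a single pass over one_hot_columns distributing each column into per-feature buckets, then assembles the output per feature, instead of A's per-feature rescans of one_hot_columns with a flag.
import Mathlib
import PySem

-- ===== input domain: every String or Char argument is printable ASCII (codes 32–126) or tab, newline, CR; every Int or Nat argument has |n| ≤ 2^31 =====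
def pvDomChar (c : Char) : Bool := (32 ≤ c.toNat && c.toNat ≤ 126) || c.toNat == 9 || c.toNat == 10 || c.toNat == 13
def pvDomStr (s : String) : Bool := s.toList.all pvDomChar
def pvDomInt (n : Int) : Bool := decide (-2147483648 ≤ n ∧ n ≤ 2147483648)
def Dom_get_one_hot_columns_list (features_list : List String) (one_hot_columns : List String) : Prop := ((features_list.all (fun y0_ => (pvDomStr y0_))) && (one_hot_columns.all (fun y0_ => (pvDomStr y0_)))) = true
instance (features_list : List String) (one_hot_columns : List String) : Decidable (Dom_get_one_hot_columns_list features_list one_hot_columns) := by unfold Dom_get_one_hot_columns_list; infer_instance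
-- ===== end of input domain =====

-- B interchanges the nested loops: one pass over one_hot_columns filling per-feature buckets, then per-feature assembly (alternative structure, same asymptotic cost).



-- ===== PORT A =====
def get_one_hot_columns_list (features_list : List String) (one_hot_columns : List String) : List String :=
  features_list.foldl (fun acc col =>
    let st := one_hot_columns.foldl
      (fun (p : List String × Bool) oh =>
        if PySem.Str.startswith oh col then (p.1 ++ [oh], true) else p)
      (acc, false)
    if st.2 = false then st.1 ++ [col] else st.1) []

-- ===== PORT B =====
def get_one_hot_columns_list_alt (features_list : List String) (one_hot_columns : List String) : List String :=
  let buckets := one_hot_columns.foldl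
    (fun bs oh =>
      (bs.zip features_list).map
        (fun p => if PySem.Str.startswith oh p.2 then p.1 ++ [oh] else p.1))
    (features_list.map (fun _ => ([] : List String)))
  (features_list.zip buckets).foldl
    (fun acc p => acc ++ (if p.2 = [] then [p.1] else p.2)) []

-- ===== PRECONDITION & SPEC =====
def Spec_get_one_hot_columns_list (features_list : List String) (one_hot_columns : List String) (out : List String) : Prop := out = get_one_hot_columns_list_alt features_list one_hot_columns
instance (features_list : List String) (one_hot_columns : List String) (out : List String) : Decidable (Spec_get_one_hot_columns_list features_list one_hot_columns out) := by unfold Spec_get_one_hot_columns_list; infer_instance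

-- ===== CLAIM (what is proved, stated in full; the proofs are below) =====
def Claim_equal_get_one_hot_columns_list : Prop := ∀ (features_list : List String) (one_hot_columns : List String), Dom_get_one_hot_columns_list features_list one_hot_columns → Spec_get_one_hot_columns_list features_list one_hot_columns (get_one_hot_columns_list features_list one_hot_columns)

-- ===== LEMMAS AND PROOFS =====

-- A's inner loop over one_hot_columns from state (acc, b) appends the matching columns and ors the flag.
theorem pv_inner_A (P : String → Bool) :
    ∀ (ohs : List String) (acc : List String) (b : Bool),
      ohs.foldl (fun (p : List String × Bool) oh =>
        if P oh then (p.1 ++ [oh], true) else p) (acc, b)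
      = (acc ++ ohs.filter P, b || !(ohs.filter P).isEmpty) := by
  intro ohs
  induction ohs with
  | nil => intro acc b; simp
  | cons oh rest ih =>
    intro acc b
    by_cases h : P oh = true
    · simp [h, ih, List.append_assoc]
    · simp [h, ih]

-- mapping over the zip of (l.map g) with l is mapping a pointwise function over l
theorem pv_zip_map {α β γ : Type} (g : α → β) (h : β → α → γ) :
    ∀ (l : List α), ((l.map g).zip l).map (fun p => h p.1 p.2) = l.map (fun c => h (g c) c) := by
  intro l
  induction l with
  | nil => simp
  | cons x xs ih => simp [ih]

-- B's bucket fold maintains: buckets = features.map (fun col => past matches of col)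
theorem pv_buckets :
    ∀ (ohs : List String) (features : List String) (g : String → List String),
      ohs.foldl (fun bs oh =>
        (bs.zip features).map
          (fun p => if PySem.Str.startswith oh p.2 then p.1 ++ [oh] else p.1))
        (features.map g)
      = features.map (fun col => g col ++ ohs.filter (fun oh => PySem.Str.startswith oh col)) := by
  intro ohs
  induction ohs with
  | nil => intro features g; simp
  | cons oh rest ih =>
    intro features g
    rw [List.foldl_cons, pv_zip_map g (fun b c => if PySem.Str.startswith oh c then b ++ [oh] else b),
        ih features (fun c => if PySem.Str.startswith oh c then g c ++ [oh] else g c)]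
    apply List.map_congr_left
    intro col _
    rw [List.filter_cons]
    split_ifs with h
    · simp
    · rfl

-- folding over the zip of l with l.map g is folding a pointwise function over l
theorem pv_zip_foldl {α β γ : Type} (g : α → β) (f : γ → α × β → γ) :
    ∀ (l : List α) (init : γ),
      (l.zip (l.map g)).foldl f init = l.foldl (fun a c => f a (c, g c)) init := by
  intro l
  induction l with
  | nil => intro init; rfl
  | cons x xs ih => intro init; simp [ih]

-- ===== VERDICT (by name: the statement is the Claim_ definition above) =====
theorem get_one_hot_columns_list_spec : Claim_equal_get_one_hot_columns_list := by
  intro features_list one_hot_columns _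
  unfold Spec_get_one_hot_columns_list
  unfold get_one_hot_columns_list get_one_hot_columns_list_alt
  rw [pv_buckets one_hot_columns features_list (fun _ => []),
      pv_zip_foldl (fun col => ([] : List String) ++ one_hot_columns.filter (fun oh => PySem.Str.startswith oh col))]
  simp only [pv_inner_A, List.nil_append, Bool.false_or]
  congr 1
  funext acc col
  by_cases h : List.filter (fun oh => PySem.Str.startswith oh col) one_hot_columns = []
  · rw [h]; simp
  · have h2 : (List.filter (fun oh => PySem.Str.startswith oh col) one_hot_columns).isEmpty = false := by
      simpa [List.isEmpty_iff] using h
    rw [h2, if_neg h]; simp
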